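-- pv_equiv track=rewrite | github.com/KimSangOuk/Coding_Test | CodingTest/Coding_Test/BAEKJOON/15685.py | make_dragoncurv
-- ===== SOURCE A (Python) =====
-- def make_dragoncurv(x,y,dirs):
--   answer=[]
--   answer.append((x,y))
--   for i in dirs:
--     nx=x+dx[i]
--     ny=y+dy[i]
--     answer.append((nx,ny))
--     x,y=nx,ny
--   return answer
--
-- dx=[1,0,-1,0]
--
-- dy=[0,-1,0,1]
-- ===== SOURCE B (Python) =====
-- dx=[1,0,-1,0]
-- dy=[0,-1,0,1]
--
-- def make_dragoncurv(x,y,dirs):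
--   xs=[x]
--   for i in dirs:
--     xs.append(xs[-1]+dx[i])
--   ys=[y]
--   for i in dirs:
--     ys.append(ys[-1]+dy[i])
--   return list(zip(xs,ys))
-- ===== Notes on version B (the rewrite author's own statement) =====
-- stated objective: alternative
-- what changed: B computes the x-coordinates and y-coordinates as two independent running accumulations (each seeded with the start coordinate) and then zips them into the point list, instead of threading one joint (x,y) state through a single fused loop.
import Mathlib
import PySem

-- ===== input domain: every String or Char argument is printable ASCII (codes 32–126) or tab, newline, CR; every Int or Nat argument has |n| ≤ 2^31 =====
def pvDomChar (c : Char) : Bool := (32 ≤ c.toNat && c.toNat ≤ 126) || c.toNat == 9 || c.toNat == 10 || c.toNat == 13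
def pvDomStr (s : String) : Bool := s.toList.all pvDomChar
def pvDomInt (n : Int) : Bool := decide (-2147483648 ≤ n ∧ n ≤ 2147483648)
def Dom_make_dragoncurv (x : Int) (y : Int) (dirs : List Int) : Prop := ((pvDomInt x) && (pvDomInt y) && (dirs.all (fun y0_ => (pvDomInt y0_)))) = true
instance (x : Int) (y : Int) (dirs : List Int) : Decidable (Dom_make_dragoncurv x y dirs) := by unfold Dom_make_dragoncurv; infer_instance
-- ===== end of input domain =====

-- B computes the x- and y-coordinates as two independent running accumulations and zips them,
-- instead of A's single fused loop threading one joint (x,y) state (objective: alternative decomposition).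

-- ===== PORT A =====
def pvDx : List Int := [1, 0, -1, 0]
def pvDy : List Int := [0, -1, 0, 1]

def make_dragoncurv (x : Int) (y : Int) (dirs : List Int) : List (Int × Int) :=
  -- answer=[(x,y)]; for i in dirs: nx=x+dx[i]; ny=y+dy[i]; answer.append((nx,ny)); x,y=nx,ny
  (dirs.foldl (fun (st : List (Int × Int) × Int × Int) i =>
      let nx := st.2.1 + (PySem.List.pyGet? pvDx i).getD 0
      let ny := st.2.2 + (PySem.List.pyGet? pvDy i).getD 0
      (st.1 ++ [(nx, ny)], nx, ny)) ([(x, y)], x, y)).1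

-- ===== PORT B =====
def make_dragoncurv_alt (x : Int) (y : Int) (dirs : List Int) : List (Int × Int) :=
  -- xs=[x]; for i in dirs: xs.append(xs[-1]+dx[i])  (and likewise ys); return list(zip(xs,ys))
  let xs := dirs.foldl (fun xs i =>
      xs ++ [PySem.List.pyGetD xs (-1) 0 + (PySem.List.pyGet? pvDx i).getD 0]) [x]
  let ys := dirs.foldl (fun ys i =>
      ys ++ [PySem.List.pyGetD ys (-1) 0 + (PySem.List.pyGet? pvDy i).getD 0]) [y]
  xs.zip ys

-- ===== PRECONDITION & SPEC =====
-- Pre_ excludes exactly the inputs on which Python A raises IndexError: a direction outside -4..3.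
def Pre_make_dragoncurv (x : Int) (y : Int) (dirs : List Int) : Prop :=
  ∀ i ∈ dirs, -4 ≤ i ∧ i < 4
instance (x : Int) (y : Int) (dirs : List Int) : Decidable (Pre_make_dragoncurv x y dirs) := by
  unfold Pre_make_dragoncurv; infer_instance

def pvWitness_make_dragoncurv : Int × Int × List Int := (0, 0, [0, 1, 2, 3, -1, -4])

def Spec_make_dragoncurv (x : Int) (y : Int) (dirs : List Int) (out : List (Int × Int)) : Prop := out = make_dragoncurv_alt x y dirs
instance (x : Int) (y : Int) (dirs : List Int) (out : List (Int × Int)) : Decidable (Spec_make_dragoncurv x y dirs out) := by unfold Spec_make_dragoncurv; infer_instance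

-- ===== CLAIM (what is proved, stated in full; the proofs are below) =====
def Claim_equal_make_dragoncurv : Prop := ∀ (x : Int) (y : Int) (dirs : List Int), Dom_make_dragoncurv x y dirs → Pre_make_dragoncurv x y dirs → Spec_make_dragoncurv x y dirs (make_dragoncurv x y dirs)

-- ===== LEMMAS AND PROOFS =====

-- reference path: the appended points, one per direction
def pvPath (x y : Int) : List Int → List (Int × Int)
  | [] => []
  | i :: t =>
      (x + (PySem.List.pyGet? pvDx i).getD 0, y + (PySem.List.pyGet? pvDy i).getD 0) ::
        pvPath (x + (PySem.List.pyGet? pvDx i).getD 0) (y + (PySem.List.pyGet? pvDy i).getD 0) t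

-- one-coordinate steps, for B's independent accumulations
def pvSteps (d : List Int) (a : Int) : List Int → List Int
  | [] => []
  | i :: t => (a + (PySem.List.pyGet? d i).getD 0) :: pvSteps d (a + (PySem.List.pyGet? d i).getD 0) t

theorem pvA_fold (dirs : List Int) : ∀ (acc : List (Int × Int)) (x y : Int),
    (dirs.foldl (fun (st : List (Int × Int) × Int × Int) i =>
      let nx := st.2.1 + (PySem.List.pyGet? pvDx i).getD 0
      let ny := st.2.2 + (PySem.List.pyGet? pvDy i).getD 0
      (st.1 ++ [(nx, ny)], nx, ny)) (acc, x, y)).1 = acc ++ pvPath x y dirs := by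
  induction dirs with
  | nil => intro acc x y; simp [pvPath]
  | cons i t ih =>
      intro acc x y
      simp only [List.foldl_cons, pvPath]
      rw [ih]
      simp

theorem pvB_fold (d : List Int) (dirs : List Int) : ∀ (acc : List Int) (a : Int),
    dirs.foldl (fun xs i =>
      xs ++ [PySem.List.pyGetD xs (-1) 0 + (PySem.List.pyGet? d i).getD 0]) (acc ++ [a])
      = acc ++ [a] ++ pvSteps d a dirs := by
  induction dirs with
  | nil => intro acc a; simp [pvSteps]
  | cons i t ih =>
      intro acc a
      simp only [List.foldl_cons, PySem.List.pyGetD_neg_one_append_singleton, pvSteps]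
      rw [ih (acc ++ [a])]
      simp

theorem pvZip_steps (dirs : List Int) : ∀ (x y : Int),
    (pvSteps pvDx x dirs).zip (pvSteps pvDy y dirs) = pvPath x y dirs := by
  induction dirs with
  | nil => intro x y; simp [pvSteps, pvPath]
  | cons i t ih =>
      intro x y
      simp only [pvSteps, pvPath, List.zip_cons_cons]
      rw [ih]

-- ===== VERDICT (by name: the statement is the Claim_ definition above) =====
theorem make_dragoncurv_spec : Claim_equal_make_dragoncurv := by
  intro x y dirs _ _
  unfold Spec_make_dragoncurv make_dragoncurv make_dragoncurv_alt
  rw [pvA_fold]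
  have hx := pvB_fold pvDx dirs [] x
  have hy := pvB_fold pvDy dirs [] y
  simp only [List.nil_append] at hx hy
  rw [hx, hy]
  simp only [List.cons_append, List.nil_append, List.zip_cons_cons, pvZip_steps]
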